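-- pv_equiv track=rewrite | github.com/posl/comment_recommendation | script/split_gen/5_time/zh/272_C/1.py | solution
-- ===== SOURCE A (Python) =====
-- def solution(n, a):
--     a.sort()
--     if a[0] == 0:
--         return -1
--     elif a[-1] % 2 == 0:
--         return a[-1]
--     else:
--         for i in range(n - 1):
--             for j in range(i + 1, n):
--                 if (a[i] + a[j]) % 2 == 0:
--                     return a[i] + a[j]
--         return -1
-- ===== SOURCE B (Python) =====
-- def solution(n, a):
--     # Return-value equivalent to A (A additionally sorts `a` in place; B does not mutate).
--     s = sorted(a)
--     if s[0] == 0: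
--         return -1
--     if s[-1] % 2 == 0:
--         return s[-1]
--     prefix = s[:n]
--     evens = [x for x in prefix if x % 2 == 0]
--     odds = [x for x in prefix if x % 2 != 0]
--     can_e = len(evens) >= 2
--     can_o = len(odds) >= 2
--     if can_e and (not can_o or prefix[0] % 2 == 0):
--         return evens[0] + evens[1]
--     if can_o:
--         return odds[0] + odds[1]
--     return -1
-- ===== Notes on version B (the rewrite author's own statement) =====
-- stated objective: alternative
-- what changed: Replaces A's nested index loops over pairs by a single selection pass on the sorted prefix: the first even-sum pair is the first two elements of whichever parity class occurs first and has at least two members (worst-case O(n log n) vs A's O(n^2), though on typical inputs A exits early so measured speed is the same).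
-- outside the precondition, e.g. on solution(-1, [1, 1, 3]): A returns -1, B returns 2; on solution(4, [1, 1, 3]): A returns 2, B returns 2
import Mathlib
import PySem

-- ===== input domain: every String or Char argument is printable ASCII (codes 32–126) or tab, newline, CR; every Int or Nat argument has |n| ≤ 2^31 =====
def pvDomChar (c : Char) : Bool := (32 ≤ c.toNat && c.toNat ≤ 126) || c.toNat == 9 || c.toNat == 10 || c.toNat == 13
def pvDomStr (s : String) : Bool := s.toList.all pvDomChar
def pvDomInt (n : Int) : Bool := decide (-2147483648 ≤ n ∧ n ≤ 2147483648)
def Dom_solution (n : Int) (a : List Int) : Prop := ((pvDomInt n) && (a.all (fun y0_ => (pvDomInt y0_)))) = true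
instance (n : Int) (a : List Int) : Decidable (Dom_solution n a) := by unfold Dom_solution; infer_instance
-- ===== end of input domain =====

-- B replaces A's quadratic nested index loops by sort + one linear selection pass
-- (first two elements of the first parity class with two members); equivalence is about
-- the RETURN value only — A sorts `a` in place, B does not mutate its argument.

-- ===== PORT A =====
-- inner loop: for j in range(i+1, n): if (a[i]+a[j]) % 2 == 0: return a[i]+a[j]
def innerA (s : List Int) (i : Int) : List Int → Option Int
  | [] => none
  | j :: js =>
    if PySem.Int.mod (PySem.List.pyGetD s i 0 + PySem.List.pyGetD s j 0) 2 == 0 then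
      some (PySem.List.pyGetD s i 0 + PySem.List.pyGetD s j 0)
    else innerA s i js

-- outer loop: for i in range(n-1): …
def outerA (s : List Int) (n : Int) : List Int → Option Int
  | [] => none
  | i :: is =>
    match innerA s i (PySem.List.pyRange (i + 1) n 1) with
    | some v => some v
    | none => outerA s n is

def solution (n : Int) (a : List Int) : Int :=
  let s := PySem.List.sorted a (fun x => x) false
  if PySem.List.pyGetD s 0 0 == 0 then -1
  else if PySem.Int.mod (PySem.List.pyGetD s (-1) 0) 2 == 0 then PySem.List.pyGetD s (-1) 0
  else match outerA s n (PySem.List.pyRange 0 (n - 1) 1) with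
       | some v => v
       | none => -1

-- ===== PORT B =====
-- B's selection over the prefix s[:n]: first two evens / first two odds, ordered by first occurrence
def bSelect (p : List Int) : Int :=
  let evens := p.filter (fun x => PySem.Int.mod x 2 == 0)
  let odds := p.filter (fun x => PySem.Int.mod x 2 != 0)
  let canE := decide (2 ≤ evens.length)
  let canO := decide (2 ≤ odds.length)
  if canE && (!canO || PySem.Int.mod (PySem.List.pyGetD p 0 0) 2 == 0) then
    PySem.List.pyGetD evens 0 0 + PySem.List.pyGetD evens 1 0
  else if canO then
    PySem.List.pyGetD odds 0 0 + PySem.List.pyGetD odds 1 0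
  else -1

def solution_alt (n : Int) (a : List Int) : Int :=
  let s := PySem.List.sorted a (fun x => x) false
  if PySem.List.pyGetD s 0 0 == 0 then -1
  else if PySem.Int.mod (PySem.List.pyGetD s (-1) 0) 2 == 0 then PySem.List.pyGetD s (-1) 0
  else bSelect (PySem.List.slice s none (some n))

-- ===== PRECONDITION & SPEC =====
-- Pre_ excludes: a = [] (A raises IndexError on a[0]); and n outside [0, len(a)] unless A answers in
-- one of its first two n-independent guard branches (min(a) = 0, or max(a) even): with n > len(a) A's
-- loops can raise IndexError, and with n < 0 (a meaningless count) A's empty range yields -1 while B's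
-- slice s[:n] counts from the end — both defensible readings of a malformed n (examples cited in the claim).
def Pre_solution (n : Int) (a : List Int) : Prop :=
  a ≠ [] ∧ ((0 ≤ n ∧ n ≤ (a.length : Int)) ∨ (0 ∈ a ∧ ∀ x ∈ a, 0 ≤ x) ∨ (∃ x ∈ a, 2 ∣ x ∧ ∀ y ∈ a, y ≤ x))
instance (n : Int) (a : List Int) : Decidable (Pre_solution n a) := by unfold Pre_solution; infer_instance
def pvWitness_solution : Int × List Int := (3, [1, 2, 4])

def Spec_solution (n : Int) (a : List Int) (out : Int) : Prop := out = solution_alt n a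
instance (n : Int) (a : List Int) (out : Int) : Decidable (Spec_solution n a out) := by unfold Spec_solution; infer_instance

-- ===== CLAIM (what is proved, stated in full; the proofs are below) =====
def Claim_equal_solution : Prop := ∀ (n : Int) (a : List Int), Dom_solution n a → Pre_solution n a → Spec_solution n a (solution n a)

-- ===== LEMMAS AND PROOFS =====

-- structural reference versions of A's loops
def findS (x : Int) : List Int → Option Int
  | [] => none
  | y :: ys => if PySem.Int.mod (x + y) 2 == 0 then some (x + y) else findS x ys

def lexF : List Int → Option Int
  | [] => none
  | x :: xs =>
    match findS x xs with
    | some v => some v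
    | none => lexF xs

theorem innerA_eq (s : List Int) (n i : Int) (hn : n ≤ (s.length : Int)) :
    ∀ (j : Int), 0 ≤ j →
      innerA s i (PySem.List.pyRange j n 1) =
      findS (PySem.List.pyGetD s i 0) ((s.take n.toNat).drop j.toNat) := by
  have H : ∀ (fuel : Nat) (j : Int), (n - j).toNat ≤ fuel → 0 ≤ j →
      innerA s i (PySem.List.pyRange j n 1) =
      findS (PySem.List.pyGetD s i 0) ((s.take n.toNat).drop j.toNat) := by
    intro fuel
    induction fuel with
    | zero =>
      intro j hle hj
      have hnj : n ≤ j := by omega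
      rw [PySem.List.pyRange_one_eq_nil hnj]
      have hdrop : ((s.take n.toNat).drop j.toNat) = [] := by
        apply List.drop_eq_nil_of_le
        have := List.length_take_le n.toNat s
        omega
      rw [hdrop]
      rfl
    | succ f ih =>
      intro j hle hj
      by_cases hjn : j < n
      · have hjlen : j.toNat < s.length := by omega
        have hjtake : j.toNat < (s.take n.toNat).length := by
          rw [List.length_take]; omega
        rw [PySem.List.pyRange_one_cons hjn,
            List.drop_eq_getElem_cons hjtake]
        have hget : PySem.List.pyGetD s j 0 = (s.take n.toNat)[j.toNat] := by
          rw [List.getElem_take]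
          exact PySem.List.pyGetD_eq_getElem s 0 hj (by omega)
        show (if (PySem.Int.mod (PySem.List.pyGetD s i 0 + PySem.List.pyGetD s j 0) 2 == 0) = true
              then some (PySem.List.pyGetD s i 0 + PySem.List.pyGetD s j 0)
              else innerA s i (PySem.List.pyRange (j + 1) n 1)) = _
        rw [hget]
        show _ = (if (PySem.Int.mod (PySem.List.pyGetD s i 0 + (s.take n.toNat)[j.toNat]) 2 == 0) = true
              then some (PySem.List.pyGetD s i 0 + (s.take n.toNat)[j.toNat])
              else findS (PySem.List.pyGetD s i 0) ((s.take n.toNat).drop (j.toNat + 1)))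
        have hj1 : (j + 1).toNat = j.toNat + 1 := by omega
        rw [ih (j + 1) (by omega) (by omega), hj1]
      · rw [PySem.List.pyRange_one_eq_nil (by omega)]
        have hdrop : ((s.take n.toNat).drop j.toNat) = [] := by
          apply List.drop_eq_nil_of_le
          have := List.length_take_le n.toNat s
          omega
        rw [hdrop]
        rfl
  intro j hj
  exact H (n - j).toNat j le_rfl hj

theorem lexF_short (l : List Int) (h : l.length ≤ 1) : lexF l = none := by
  match l, h with
  | [], _ => rfl
  | [x], _ => rfl

theorem outerA_eq (s : List Int) (n : Int) (hn : n ≤ (s.length : Int)) :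
    ∀ (k : Int), 0 ≤ k →
      outerA s n (PySem.List.pyRange k (n - 1) 1) =
      lexF ((s.take n.toNat).drop k.toNat) := by
  have H : ∀ (fuel : Nat) (k : Int), (n - 1 - k).toNat ≤ fuel → 0 ≤ k →
      outerA s n (PySem.List.pyRange k (n - 1) 1) =
      lexF ((s.take n.toNat).drop k.toNat) := by
    intro fuel
    induction fuel with
    | zero =>
      intro k hle hk
      rw [PySem.List.pyRange_one_eq_nil (by omega : n - 1 ≤ k)]
      have hlen := List.length_take_le n.toNat s
      rw [(lexF_short _ (by simp [List.length_drop]; omega)).symm.symm]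
      rfl
    | succ f ih =>
      intro k hle hk
      by_cases hkn : k < n - 1
      · have hktake : k.toNat < (s.take n.toNat).length := by
          rw [List.length_take]; omega
        rw [PySem.List.pyRange_one_cons hkn,
            List.drop_eq_getElem_cons hktake]
        have hget : PySem.List.pyGetD s k 0 = (s.take n.toNat)[k.toNat] := by
          rw [List.getElem_take]
          exact PySem.List.pyGetD_eq_getElem s 0 hk (by omega)
        have hk1 : (k + 1).toNat = k.toNat + 1 := by omega
        show (match innerA s k (PySem.List.pyRange (k + 1) n 1) with
              | some v => some v
              | none => outerA s n (PySem.List.pyRange (k + 1) (n - 1) 1)) = _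
        rw [innerA_eq s n k hn (k + 1) (by omega), hget, hk1,
            ih (k + 1) (by omega) (by omega), hk1]
        rfl
      · rw [PySem.List.pyRange_one_eq_nil (by omega : n - 1 ≤ k)]
        have hlen := List.length_take_le n.toNat s
        rw [(lexF_short _ (by simp [List.length_drop]; omega)).symm.symm]
        rfl
  intro k hk
  exact H (n - 1 - k).toNat k le_rfl hk

theorem findS_even (x : Int) (xs : List Int) (hx : 2 ∣ x) :
    findS x xs = ((xs.filter (fun y => y % 2 == 0)).head?).map (x + ·) := by
  induction xs with
  | nil => rfl
  | cons y ys ih =>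
    rw [show findS x (y :: ys) =
        (if PySem.Int.mod (x + y) 2 == 0 then some (x + y) else findS x ys) from rfl,
        List.filter_cons]
    by_cases hy : 2 ∣ y
    · have hc : (PySem.Int.mod (x + y) 2 == 0) = true := by simp; omega
      have hno : ¬ ((x + y) % 2 = 1) := by omega
      simp [hc, hy, hno]
    · have hc : (PySem.Int.mod (x + y) 2 == 0) = false := by simp; omega
      have hy' : ¬ ((y % 2 == 0) = true) := by simp; omega
      have hno : ¬ (2 ∣ (x + y)) := by omega
      simp [hc, hy', hno, ih]

theorem findS_odd (x : Int) (xs : List Int) (hx : ¬ 2 ∣ x) :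
    findS x xs = ((xs.filter (fun y => y % 2 != 0)).head?).map (x + ·) := by
  induction xs with
  | nil => rfl
  | cons y ys ih =>
    rw [show findS x (y :: ys) =
        (if PySem.Int.mod (x + y) 2 == 0 then some (x + y) else findS x ys) from rfl,
        List.filter_cons]
    by_cases hy : 2 ∣ y
    · have hc : (PySem.Int.mod (x + y) 2 == 0) = false := by simp; omega
      have hy' : ¬ ((y % 2 != 0) = true) := by simp; omega
      have hno : ¬ (2 ∣ (x + y)) := by omega
      simp [hc, hy', hno, ih]
    · have hc : (PySem.Int.mod (x + y) 2 == 0) = true := by simp; omega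
      have hy' : (y % 2 != 0) = true := by simp; omega
      have hno : ¬ ((x + y) % 2 = 1) := by omega
      simp [hc, hy', hno]

theorem bSelect_eq (p : List Int) : bSelect p = (lexF p).getD (-1) := by
  induction p with
  | nil => rfl
  | cons x xs ih =>
    have hlex : lexF (x :: xs) =
        (match findS x xs with | some v => some v | none => lexF xs) := rfl
    by_cases hx : 2 ∣ x
    · rw [findS_even x xs hx] at hlex
      have hx1 : ¬ (x % 2 = 1) := by omega
      cases hE : xs.filter (fun y => y % 2 == 0) with
      | nil =>
        rw [hlex, hE]
        show bSelect (x :: xs) = (lexF xs).getD (-1)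
        rw [← ih]
        simp [bSelect, hx, hE, PySem.List.pyGetD_ofNat']
      | cons e E' =>
        rw [hlex, hE]
        simp [bSelect, hx, hE, PySem.List.pyGetD_ofNat']
    · rw [findS_odd x xs hx] at hlex
      have hx1 : x % 2 = 1 := by omega
      cases hO : xs.filter (fun y => y % 2 != 0) with
      | nil =>
        rw [hlex, hO]
        show bSelect (x :: xs) = (lexF xs).getD (-1)
        rw [← ih]
        simp [bSelect, hx1, hO, PySem.List.pyGetD_ofNat']
      | cons o O' =>
        rw [hlex, hO]
        simp [bSelect, hx1, hO, PySem.List.pyGetD_ofNat']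

theorem loops_eq (s : List Int) (n : Int) (h0 : 0 ≤ n) (hn : n ≤ (s.length : Int)) :
    (match outerA s n (PySem.List.pyRange 0 (n - 1) 1) with
     | some v => v
     | none => (-1 : Int)) = bSelect (PySem.List.slice s none (some n)) := by
  rw [PySem.List.slice_to _ h0, bSelect_eq]
  have := outerA_eq s n hn 0 le_rfl
  simp only [Int.toNat_zero, List.drop_zero] at this
  rw [this]
  cases lexF (s.take n.toNat) <;> rfl

theorem sorted_head_zero (a : List Int) (h0 : 0 ∈ a) (hpos : ∀ x ∈ a, 0 ≤ x) :
    (PySem.List.pyGetD (PySem.List.sorted a (fun x => x) false) 0 0 == 0) = true := by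
  have hne : PySem.List.sorted a (fun x => x) false ≠ [] := by
    rw [Ne, PySem.List.sorted_eq_nil_iff]
    rintro rfl; simp at h0
  obtain ⟨m, t, hmt⟩ := List.exists_cons_of_ne_nil hne
  have hmin : m ≤ 0 := by simpa using PySem.List.key_head_sorted_le a (fun x => x) hmt 0 h0
  have hm_mem : m ∈ a := by
    have hm : m ∈ PySem.List.sorted a (fun x => x) false := by
      rw [hmt]; exact List.mem_cons_self
    rwa [PySem.List.mem_sorted] at hm
  have h2 : 0 ≤ m := hpos m hm_mem
  rw [hmt, PySem.List.pyGetD_zero_cons]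
  simp only [beq_iff_eq]; omega

theorem sorted_last_even (a : List Int) (x : Int) (hx : x ∈ a) (h2 : 2 ∣ x)
    (hmax : ∀ y ∈ a, y ≤ x) :
    (PySem.Int.mod (PySem.List.pyGetD (PySem.List.sorted a (fun x => x) false) (-1) 0) 2 == 0) = true := by
  have hne : PySem.List.sorted a (fun x => x) false ≠ [] := by
    rw [Ne, PySem.List.sorted_eq_nil_iff]
    rintro rfl; simp at hx
  have hpos : 0 < (PySem.List.sorted a (fun x => x) false).length := List.length_pos_iff.mpr hne
  rw [PySem.List.pyGetD_neg_one _ _ hne, List.getLast_eq_getElem hne]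
  have hlast_mem : (PySem.List.sorted a (fun x => x) false)[(PySem.List.sorted a (fun x => x) false).length - 1]'(by omega) ∈ a := by
    have hm : (PySem.List.sorted a (fun x => x) false)[(PySem.List.sorted a (fun x => x) false).length - 1]'(by omega) ∈ PySem.List.sorted a (fun x => x) false :=
      List.getElem_mem _
    rwa [PySem.List.mem_sorted] at hm
  have hle := hmax _ hlast_mem
  have hxs : x ∈ PySem.List.sorted a (fun x => x) false := by
    rw [PySem.List.mem_sorted]; exact hx
  obtain ⟨p, hp, hpx⟩ := List.mem_iff_getElem.mp hxs
  have hge : x ≤ (PySem.List.sorted a (fun x => x) false)[(PySem.List.sorted a (fun x => x) false).length - 1]'(by omega) := by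
    have := PySem.List.key_sorted_getElem_mono a (fun x => x) (p := p)
      (q := (PySem.List.sorted a (fun x => x) false).length - 1) (by omega) (by omega)
    simpa [hpx] using this
  have heq : (PySem.List.sorted a (fun x => x) false)[(PySem.List.sorted a (fun x => x) false).length - 1]'(by omega) = x := le_antisymm hle hge
  rw [heq]
  simp only [beq_iff_eq]
  rw [PySem.Int.mod_eq_zero_iff_dvd]
  exact h2

-- ===== VERDICT (by name: the statement is the Claim_ definition above) =====
theorem solution_spec : Claim_equal_solution := by
  intro n a _hdom hpre
  obtain ⟨hne, hcases⟩ := hpre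
  unfold Spec_solution solution solution_alt
  have hslen : (PySem.List.sorted a (fun x => x) false).length = a.length :=
    PySem.List.length_sorted a _ false
  by_cases h1 : (PySem.List.pyGetD (PySem.List.sorted a (fun x => x) false) 0 0 == 0) = true
  · simp only [h1, if_true]
  · rw [Bool.not_eq_true] at h1
    by_cases h2 : (PySem.Int.mod (PySem.List.pyGetD (PySem.List.sorted a (fun x => x) false) (-1) 0) 2 == 0) = true
    · simp only [h1, h2, Bool.false_eq_true, if_false, if_true]
    · rw [Bool.not_eq_true] at h2
      simp only [h1, h2, Bool.false_eq_true, if_false]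
      rcases hcases with ⟨h0, hlen⟩ | hmin | ⟨x, hx, hx2, hmax⟩
      · exact loops_eq _ n h0 (by rw [hslen]; exact hlen)
      · rw [sorted_head_zero a hmin.1 hmin.2] at h1; simp at h1
      · rw [sorted_last_even a x hx hx2 hmax] at h2; simp at h2
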